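-- pv_equiv track=rewrite | github.com/arrobaraujo/map_maker | src/services/layer_service.py | compute_legend_rows
-- ===== SOURCE A (Python) =====
-- from typing import Any, Dict, Iterable, List, Optional, Set
--
-- def compute_legend_rows(active_layers: Dict[str, Dict[str, Any]]) -> List[Dict[str, str]]:
--     """Builds flattened legend rows preserving grouping rules used by the UI."""
--     groups: Dict[str, List[Dict[str, Any]]] = {}
--     for data in active_layers.values():
--         short_name = data.get("short_name", "")
--         groups.setdefault(short_name, []).append(data)
--
--     rows: List[Dict[str, str]] = []
--     for short_name, layers in groups.items():
--         color_groups: Dict[str, List[Dict[str, Any]]] = {}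
--         for layer in layers:
--             color = layer.get("color", "#000000")
--             color_groups.setdefault(color, []).append(layer)
--
--         for color, sub_layers in color_groups.items():
--             layer0 = sub_layers[0]
--             is_circular = "circular" in str(layer0.get("trip_headsign", "")).lower()
--             if is_circular or len(sub_layers) > 1:
--                 text = f"{short_name} - {layer0.get('long_name', '')}".strip(" - ")
--             else:
--                 text = layer0.get("display_name", "")
--
--             rows.append({"color": color, "text": text})
--
--     return rows
-- ===== SOURCE B (Python) =====
-- from typing import Any, Dict, List
--
--
-- def compute_legend_rows(active_layers: Dict[str, Dict[str, Any]]) -> List[Dict[str, str]]: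
--     """Sieve-style: no dicts at all — repeatedly peel off the first remaining
--     short_name class, and inside it the first remaining color class, by list
--     partitioning; emit one row per peeled color class."""
--     rows: List[Dict[str, str]] = []
--     pending = list(active_layers.values())
--     while pending:
--         sn = pending[0].get("short_name", "")
--         group = [d for d in pending if d.get("short_name", "") == sn]
--         pending = [d for d in pending if d.get("short_name", "") != sn]
--         while group:
--             color = group[0].get("color", "#000000")
--             sub = [d for d in group if d.get("color", "#000000") == color]
--             group = [d for d in group if d.get("color", "#000000") != color]
--             layer0 = sub[0]
--             is_circular = "circular" in str(layer0.get("trip_headsign", "")).lower()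
--             if is_circular or len(sub) > 1:
--                 text = f"{sn} - {layer0.get('long_name', '')}".strip(" - ")
--             else:
--                 text = layer0.get("display_name", "")
--             rows.append({"color": color, "text": text})
--     return rows
-- ===== Notes on version B (the rewrite author's own statement) =====
-- stated objective: alternative
-- what changed: A's two-phase dict grouping (setdefault by short_name, then setdefault by color, then iterate the dicts' items) is replaced by a dict-free sieve: repeatedly partition the remaining layer list on the first element's short_name, and inside that class on the first element's color, emitting one row per peeled color class.
import Mathlib
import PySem

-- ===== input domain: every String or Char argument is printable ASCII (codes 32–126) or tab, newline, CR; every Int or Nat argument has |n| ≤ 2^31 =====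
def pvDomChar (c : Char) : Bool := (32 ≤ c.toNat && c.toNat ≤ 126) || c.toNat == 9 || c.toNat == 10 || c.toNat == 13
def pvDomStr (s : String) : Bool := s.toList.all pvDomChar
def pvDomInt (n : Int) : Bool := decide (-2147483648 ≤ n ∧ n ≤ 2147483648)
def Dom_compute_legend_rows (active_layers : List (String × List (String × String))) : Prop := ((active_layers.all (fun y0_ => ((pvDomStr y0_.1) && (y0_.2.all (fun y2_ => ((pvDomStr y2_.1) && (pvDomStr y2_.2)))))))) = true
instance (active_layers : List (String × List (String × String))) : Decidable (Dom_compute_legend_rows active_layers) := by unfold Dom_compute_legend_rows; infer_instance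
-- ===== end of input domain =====

-- B replaces A's dict-based two-phase grouping by a dict-free sieve: it repeatedly
-- peels off the first remaining short_name class, and inside it the first remaining
-- color class, by list partitioning; objective: alternative decomposition.

-- ===== PORT A =====
-- Emit one legend row from a color group (sub_layers is nonempty wherever A reaches
-- this, so Python's `sub_layers[0]` is ported as headD — exact on every reachable call).
def pvRowA (short_name color : String) (sub_layers : List (PySem.Dict String String)) :
    List (String × String) :=
  let layer0 := sub_layers.headD PySem.Dict.empty
  let is_circular := PySem.Str.isIn "circular" (PySem.Str.lower (layer0.getD "trip_headsign" ""))
  let text :=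
    if is_circular || decide (1 < sub_layers.length) then
      PySem.Str.stripChars (short_name ++ " - " ++ layer0.getD "long_name" "") " - "
    else layer0.getD "display_name" ""
  [("color", color), ("text", text)]

-- the setdefault(key, []).append(x) pattern A uses twice
def pvGrp (key : PySem.Dict String String → String)
    (g : PySem.Dict String (List (PySem.Dict String String)))
    (x : PySem.Dict String String) :
    PySem.Dict String (List (PySem.Dict String String)) :=
  g.insert (key x) (g.getD (key x) [] ++ [x])

def pvKeySn (d : PySem.Dict String String) : String := d.getD "short_name" ""
def pvKeyCol (d : PySem.Dict String String) : String := d.getD "color" "#000000"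

def compute_legend_rows (active_layers : List (String × List (String × String))) :
    List (List (String × String)) :=
  ((active_layers.foldl (fun g p => pvGrp pvKeySn g (PySem.Dict.mk p.2)) PySem.Dict.empty).items).foldl
    (fun rows sl =>
      ((sl.2.foldl (pvGrp pvKeyCol) PySem.Dict.empty).items).foldl
        (fun rows cs => rows ++ [pvRowA sl.1 cs.1 cs.2]) rows) []

-- ===== PORT B =====
-- inner while loop of Source B: peel the first remaining color class off `group`
def pvInnerLoop (sn : String) (rows : List (List (String × String)))
    (group : List (PySem.Dict String String)) : List (List (String × String)) :=
  match group with
  | [] => rows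
  | d :: t =>
    let color := d.getD "color" "#000000"
    let sub := (d :: t).filter (fun x => x.getD "color" "#000000" == color)
    let group' := (d :: t).filter (fun x => !(x.getD "color" "#000000" == color))
    let layer0 := sub.headD PySem.Dict.empty
    let is_circular := PySem.Str.isIn "circular" (PySem.Str.lower (layer0.getD "trip_headsign" ""))
    let text :=
      if is_circular || decide (1 < sub.length) then
        PySem.Str.stripChars (sn ++ " - " ++ layer0.getD "long_name" "") " - "
      else layer0.getD "display_name" ""
    pvInnerLoop sn (rows ++ [[("color", color), ("text", text)]]) group'
termination_by group.length
decreasing_by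
  simp only [List.filter_cons, beq_self_eq_true, Bool.not_true, if_neg, Bool.false_eq_true,
    not_false_eq_true, List.length_cons]
  exact Nat.lt_succ_of_le (List.length_filter_le _ t)

-- outer while loop of Source B: peel the first remaining short_name class off `pending`
def pvOuterLoop (rows : List (List (String × String)))
    (pending : List (PySem.Dict String String)) : List (List (String × String)) :=
  match pending with
  | [] => rows
  | d :: t =>
    let sn := d.getD "short_name" ""
    let group := (d :: t).filter (fun x => x.getD "short_name" "" == sn)
    let pending' := (d :: t).filter (fun x => !(x.getD "short_name" "" == sn))
    pvOuterLoop (pvInnerLoop sn rows group) pending'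
termination_by pending.length
decreasing_by
  simp only [List.filter_cons, beq_self_eq_true, Bool.not_true, if_neg, Bool.false_eq_true,
    not_false_eq_true, List.length_cons]
  exact Nat.lt_succ_of_le (List.length_filter_le _ t)

def compute_legend_rows_alt (active_layers : List (String × List (String × String))) :
    List (List (String × String)) :=
  pvOuterLoop [] (active_layers.map (fun p => PySem.Dict.mk p.2))

-- ===== PRECONDITION & SPEC =====
def Spec_compute_legend_rows (active_layers : List (String × List (String × String))) (out : List (List (String × String))) : Prop := out = compute_legend_rows_alt active_layers
instance (active_layers : List (String × List (String × String))) (out : List (List (String × String))) : Decidable (Spec_compute_legend_rows active_layers out) := by unfold Spec_compute_legend_rows; infer_instance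

-- ===== CLAIM =====
def Claim_equal_compute_legend_rows : Prop := ∀ (active_layers : List (String × List (String × String))), Dom_compute_legend_rows active_layers → Spec_compute_legend_rows active_layers (compute_legend_rows active_layers)

-- ===== LEMMAS AND PROOFS =====

-- dedup-by-first-occurrence commutes with filter
theorem pv_ofList_filter {α : Type} [BEq α] [LawfulBEq α] (p : α → Bool) (xs : List α) :
    (PySem.Set.ofList xs).filter p = PySem.Set.ofList (xs.filter p) := by
  induction xs with
  | nil => rfl
  | cons x t ih =>
    rw [PySem.Set.ofList_cons, List.filter_cons]
    by_cases hp : p x = true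
    · rw [if_pos hp, List.filter_cons, if_pos hp, PySem.Set.ofList_cons, ← ih]
      simp only [PySem.Set.discard, List.filter_filter]
      congr 1
      apply List.filter_congr
      intro y _
      simp [Bool.and_comm]
    · rw [if_neg hp, List.filter_cons, if_neg hp, ← ih]
      simp only [PySem.Set.discard, List.filter_filter]
      apply List.filter_congr
      intro y _
      by_cases hyx : y = x
      · subst hyx; simp [hp]
      · simp [hyx]

-- value at k of A's grouping fold
theorem pv_getD_grp (key : PySem.Dict String String → String)
    (L : List (PySem.Dict String String))
    (g : PySem.Dict String (List (PySem.Dict String String))) (k : String) :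
    (L.foldl (pvGrp key) g).getD k [] = g.getD k [] ++ L.filter (fun x => key x == k) := by
  induction L generalizing g with
  | nil => simp
  | cons x t ih =>
    simp only [List.foldl_cons, List.filter_cons]
    rw [ih]
    by_cases h : key x = k
    · rw [pvGrp, PySem.Dict.getD_insert, if_pos h.symm]
      simp [h]
    · rw [pvGrp, PySem.Dict.getD_insert, if_neg (Ne.symm h)]
      simp [h]

-- items of A's grouping fold: distinct keys in first-occurrence order, each with its class
theorem pv_items_grp (key : PySem.Dict String String → String)
    (L : List (PySem.Dict String String)) :
    (L.foldl (pvGrp key) PySem.Dict.empty).items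
      = (PySem.Set.ofList (L.map key)).map (fun k => (k, L.filter (fun x => key x == k))) := by
  have heq : L.foldl (pvGrp key) PySem.Dict.empty
      = L.foldl (fun d x => d.insert (key x) (d.getD (key x) [] ++ [x])) PySem.Dict.empty := rfl
  have hnd : (L.foldl (pvGrp key) PySem.Dict.empty).keys.Nodup := by
    rw [heq]
    exact PySem.Dict.nodup_keys_foldl_insert_key L key _ _ PySem.Dict.nodup_keys_empty
  have hkeys : (L.foldl (pvGrp key) PySem.Dict.empty).keys = PySem.Set.ofList (L.map key) := by
    rw [heq, PySem.Dict.keys_foldl_insert_key]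
    simp [PySem.Set.update_nil_left]
  rw [PySem.Dict.items_eq_map_keys _ hnd [], hkeys]
  apply List.map_congr_left
  intro k _
  rw [pv_getD_grp]
  simp

-- peeling the head's class off a list peels its key off the ordered key set
theorem pv_peel (key : PySem.Dict String String → String)
    (d : PySem.Dict String String) (t : List (PySem.Dict String String)) :
    PySem.Set.ofList ((d :: t).map key)
      = key d :: PySem.Set.ofList
          (((d :: t).filter (fun y => !(key y == key d))).map key) := by
  rw [List.map_cons, PySem.Set.ofList_cons]
  congr 1
  have h1 : (d :: t).filter (fun y => !(key y == key d))
      = t.filter (fun y => !(key y == key d)) := by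
    simp
  rw [h1]
  have h2 : (t.filter (fun y => !(key y == key d))).map key
      = (t.map key).filter (fun q => !(q == key d)) := by
    rw [List.filter_map]
    rfl
  rw [h2, ← pv_ofList_filter]
  rfl

-- the classes of the other keys are untouched by removing the head's class
theorem pv_filter_ne (key : PySem.Dict String String → String)
    (L : List (PySem.Dict String String)) (k k0 : String) (h : k ≠ k0) :
    (L.filter (fun y => !(key y == k0))).filter (fun x => key x == k)
      = L.filter (fun x => key x == k) := by
  rw [List.filter_filter]
  apply List.filter_congr
  intro y _
  by_cases hy : key y = k
  · simp [hy, h]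
  · simp [hy]

-- one unrolling of B's inner loop, with the emitted row named
theorem pvInnerLoop_cons (sn : String) (rows : List (List (String × String)))
    (d : PySem.Dict String String) (t : List (PySem.Dict String String)) :
    pvInnerLoop sn rows (d :: t)
      = pvInnerLoop sn
          (rows ++ [pvRowA sn (d.getD "color" "#000000")
            ((d :: t).filter (fun x => x.getD "color" "#000000" == d.getD "color" "#000000"))])
          ((d :: t).filter (fun x => !(x.getD "color" "#000000" == d.getD "color" "#000000"))) := by
  rw [pvInnerLoop]
  simp only [pvRowA]

-- one unrolling of B's outer loop
theorem pvOuterLoop_cons (rows : List (List (String × String)))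
    (d : PySem.Dict String String) (t : List (PySem.Dict String String)) :
    pvOuterLoop rows (d :: t)
      = pvOuterLoop
          (pvInnerLoop (d.getD "short_name" "") rows
            ((d :: t).filter (fun x => x.getD "short_name" "" == d.getD "short_name" "")))
          ((d :: t).filter (fun x => !(x.getD "short_name" "" == d.getD "short_name" ""))) := by
  rw [pvOuterLoop]

-- B's inner loop computes the color blocks of its group, in first-occurrence order
theorem pv_inner_char (sn : String) (rows : List (List (String × String)))
    (G : List (PySem.Dict String String)) :
    pvInnerLoop sn rows G
      = rows ++ (PySem.Set.ofList (G.map pvKeyCol)).map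
          (fun q => pvRowA sn q (G.filter (fun x => pvKeyCol x == q))) := by
  match G with
  | [] => simp [pvInnerLoop, PySem.Set.ofList]
  | d :: t =>
    rw [pvInnerLoop_cons]
    have ih := pv_inner_char sn
      (rows ++ [pvRowA sn (d.getD "color" "#000000")
        ((d :: t).filter (fun x => x.getD "color" "#000000" == d.getD "color" "#000000"))])
      ((d :: t).filter (fun x => !(x.getD "color" "#000000" == d.getD "color" "#000000")))
    rw [ih, pv_peel pvKeyCol d t, List.map_cons, List.append_assoc, List.singleton_append]
    refine congrArg (rows ++ ·) (congrArg₂ List.cons rfl ?_)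
    apply List.map_congr_left
    intro q hq
    have hqne : q ≠ pvKeyCol d := by
      have hm := (PySem.Set.mem_ofList _ _).mp hq
      obtain ⟨y, hy, rfl⟩ := List.mem_map.mp hm
      have hf := (List.mem_filter.mp hy).2
      simp only [Bool.not_eq_eq_eq_not, Bool.not_true, beq_eq_false_iff_ne, ne_eq] at hf
      exact hf
    rw [show ((d :: t).filter (fun x => !(x.getD "color" "#000000" == d.getD "color" "#000000")))
        = ((d :: t).filter (fun y => !(pvKeyCol y == pvKeyCol d))) from rfl]
    rw [pv_filter_ne pvKeyCol (d :: t) q (pvKeyCol d) hqne]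
termination_by G.length
decreasing_by
  simp only [List.filter_cons, beq_self_eq_true, Bool.not_true, if_neg, Bool.false_eq_true,
    not_false_eq_true, List.length_cons]
  exact Nat.lt_succ_of_le (List.length_filter_le _ t)

-- B's outer loop computes all blocks, short_name classes in first-occurrence order
theorem pv_outer_char (rows : List (List (String × String)))
    (P : List (PySem.Dict String String)) :
    pvOuterLoop rows P
      = rows ++ (PySem.Set.ofList (P.map pvKeySn)).flatMap
          (fun k =>
            (PySem.Set.ofList ((P.filter (fun x => pvKeySn x == k)).map pvKeyCol)).map
              (fun q => pvRowA k q
                ((P.filter (fun x => pvKeySn x == k)).filter (fun x => pvKeyCol x == q)))) := by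
  match P with
  | [] => simp [pvOuterLoop, PySem.Set.ofList]
  | d :: t =>
    rw [pvOuterLoop_cons]
    have ih := pv_outer_char
      (pvInnerLoop (d.getD "short_name" "") rows
        ((d :: t).filter (fun x => x.getD "short_name" "" == d.getD "short_name" "")))
      ((d :: t).filter (fun x => !(x.getD "short_name" "" == d.getD "short_name" "")))
    rw [ih, pv_inner_char, pv_peel pvKeySn d t, List.flatMap_cons, List.append_assoc]
    refine congrArg (rows ++ ·) (congrArg₂ (· ++ ·) rfl ?_)
    apply List.flatMap_congr
    intro k hk
    have hkne : k ≠ pvKeySn d := by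
      have hm := (PySem.Set.mem_ofList _ _).mp hk
      obtain ⟨y, hy, rfl⟩ := List.mem_map.mp hm
      have hf := (List.mem_filter.mp hy).2
      simp only [Bool.not_eq_eq_eq_not, Bool.not_true, beq_eq_false_iff_ne, ne_eq] at hf
      exact hf
    rw [show ((d :: t).filter (fun x => !(x.getD "short_name" "" == d.getD "short_name" "")))
        = ((d :: t).filter (fun y => !(pvKeySn y == pvKeySn d))) from rfl]
    rw [pv_filter_ne pvKeySn (d :: t) k (pvKeySn d) hkne]
termination_by P.length
decreasing_by
  simp only [List.filter_cons, beq_self_eq_true, Bool.not_true, if_neg, Bool.false_eq_true,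
    not_false_eq_true, List.length_cons]
  exact Nat.lt_succ_of_le (List.length_filter_le _ t)

theorem pv_main (al : List (String × List (String × String))) :
    compute_legend_rows al = compute_legend_rows_alt al := by
  unfold compute_legend_rows compute_legend_rows_alt
  rw [show al.foldl (fun g p => pvGrp pvKeySn g (PySem.Dict.mk p.2)) PySem.Dict.empty
      = (al.map (fun p => PySem.Dict.mk p.2)).foldl (pvGrp pvKeySn) PySem.Dict.empty from
    List.foldl_map.symm]
  rw [pv_items_grp pvKeySn (al.map (fun p => PySem.Dict.mk p.2))]
  rw [pv_outer_char [] (al.map (fun p => PySem.Dict.mk p.2))]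
  simp only [List.nil_append]
  simp only [PySem.List.foldl_append_singleton_eq_map]
  rw [PySem.List.foldl_append_eq_flatMap]
  simp only [List.nil_append, List.flatMap_map]
  apply List.flatMap_congr
  intro k _
  rw [pv_items_grp pvKeyCol]
  rw [List.map_map]
  rfl

-- ===== VERDICT =====
theorem compute_legend_rows_spec : Claim_equal_compute_legend_rows := by
  intro al _
  unfold Spec_compute_legend_rows
  exact pv_main al
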